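-- pv_equiv track=rewrite | github.com/alonappleboim/seqtools | common/seq_iters.py | hamming_ball
-- ===== SOURCE A (Python) =====
-- def hamming_ball(seq, radius, alphabet='CGTAN'):
--     ball = [seq]
--     if radius > 0:
--         for i in range(len(seq)):
--             for l in alphabet:
--                 seql = list(seq)
--                 seql[i] = l
--                 ball.extend(hamming_ball(''.join(seql), radius-1, alphabet))
--     return ball
-- ===== SOURCE B (Python) =====
-- def hamming_ball(seq, radius, alphabet='CGTAN'):
--     # Iterative DFS with an explicit stack instead of recursion (same pre-order
--     # output, including duplicate multiplicities).
--     result = []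
--     stack = [(seq, radius)]
--     while stack:
--         s, r = stack.pop()
--         result.append(s)
--         if r > 0:
--             children = [s[:i] + l + s[i+1:] for i in range(len(s)) for l in alphabet]
--             stack.extend((c, r - 1) for c in reversed(children))
--     return result
-- ===== Notes on version B (the rewrite author's own statement) =====
-- stated objective: alternative
-- what changed: Replaces the nested-loop recursion with an iterative explicit-stack pre-order traversal (pop a (string, radius) node, emit it, push its one-substitution children reversed), producing the identical sequence with identical duplicate multiplicities.
import Mathlib
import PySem

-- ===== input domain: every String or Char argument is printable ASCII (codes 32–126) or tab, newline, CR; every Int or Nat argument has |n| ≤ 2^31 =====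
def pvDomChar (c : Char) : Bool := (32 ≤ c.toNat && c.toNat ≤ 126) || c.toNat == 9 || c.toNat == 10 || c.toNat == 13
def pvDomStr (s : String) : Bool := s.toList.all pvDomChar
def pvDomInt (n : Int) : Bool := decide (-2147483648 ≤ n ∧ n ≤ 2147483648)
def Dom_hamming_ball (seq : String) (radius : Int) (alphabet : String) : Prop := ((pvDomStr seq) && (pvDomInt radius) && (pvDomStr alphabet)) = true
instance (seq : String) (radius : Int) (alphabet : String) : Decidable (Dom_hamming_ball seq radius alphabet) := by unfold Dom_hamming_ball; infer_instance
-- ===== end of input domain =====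

-- B replaces A's recursion by an explicit-stack pre-order traversal (alternative
-- decomposition, same output sequence and duplicate multiplicities).

-- ===== PORT A =====
-- A recurses with radius-1 while radius > 0; we recurse on radius.toNat, which is
-- the same test (radius > 0 ↔ radius.toNat = n+1) and the same decrement on that branch.
def hammingA (al : String) : Nat → String → List String
  | 0, s => [s]                                   -- ball = [seq]; radius > 0 is false
  | n + 1, s =>                                   -- radius > 0
      (List.range s.length).foldl (fun ball i =>  -- for i in range(len(seq))
        al.toList.foldl (fun ball l =>            -- for l in alphabet
          -- seql = list(seq); seql[i] = l; ball.extend(hamming_ball(''.join(seql), radius-1, alphabet))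
          ball ++ hammingA al n (String.ofList (s.toList.set i l))) ball) [s]

def hamming_ball (seq : String) (radius : Int) (alphabet : String) : List String :=
  hammingA alphabet radius.toNat seq

-- ===== PORT B =====
-- children = [s[:i] + l + s[i+1:] for i in range(len(s)) for l in alphabet]
def childrenB (al : String) (s : String) : List String :=
  (List.range s.length).flatMap (fun i =>
    al.toList.map (fun l => String.ofList (s.toList.take i ++ [l] ++ s.toList.drop (i + 1))))

-- per-node weight; used only for the termination measure of the stack loop
def pvW (al : String) (p : String × Nat) : Nat := (p.1.length * al.length + 1) ^ p.2

-- termination fact for the stack loop: a popped node outweighs all its pushed children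
theorem pvW_children_lt (al s : String) (n : Nat) :
    ((((childrenB al s).map (fun c => (c, n))).map (pvW al)).sum) < pvW al (s, n + 1) := by
  have hev : ∀ x ∈ ((childrenB al s).map (fun c => (c, n))).map (pvW al),
      x = (s.length * al.length + 1) ^ n := by
    intro x hx
    simp only [List.map_map, List.mem_map, Function.comp] at hx
    obtain ⟨c, hc, rfl⟩ := hx
    simp only [childrenB, List.mem_flatMap, List.mem_map] at hc
    obtain ⟨i, hi, l, _, rfl⟩ := hc
    have hi' : i < s.length := List.mem_range.mp hi
    have hlen : (String.ofList (s.toList.take i ++ [l] ++ s.toList.drop (i + 1))).length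
        = s.length := by
      simp only [String.length_ofList, List.length_append, List.length_take,
        List.length_drop, List.length_cons, List.length_nil, String.length_toList,
        Nat.min_eq_left (Nat.le_of_lt hi')]
      omega
    simp only [pvW]
    rw [hlen]
  rw [List.sum_eq_card_nsmul _ _ hev]
  have hcard : (((childrenB al s).map (fun c => (c, n))).map (pvW al)).length
      = s.length * al.length := by
    simp [childrenB, List.length_flatMap]
  rw [hcard]
  have hpow : 0 < (s.length * al.length + 1) ^ n := Nat.pow_pos (by omega)
  simp only [smul_eq_mul, pvW, pow_succ]
  nlinarith

-- the while-stack loop of Source B; the stack's top (python list end, where .pop() and the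
-- reversed .extend act) is the HEAD of this list, so pushing reversed(children) is
-- prepending the children in their original order.  Radii are carried as r.toNat
-- (the loop only tests r > 0 and computes r-1 on that branch).
def hammingB (al : String) : List (String × Nat) → List String
  | [] => []                                                -- while stack: … ; return result
  | (s, 0) :: rest => s :: hammingB al rest                 -- pop, append s, r > 0 false
  | (s, n + 1) :: rest =>                                   -- pop, append s, push children with r-1
      s :: hammingB al ((childrenB al s).map (fun c => (c, n)) ++ rest)
  termination_by stack => (stack.map (pvW al)).sum
  decreasing_by
  · simp only [List.map_cons, List.sum_cons, pvW, pow_zero]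
    omega
  · simp only [List.map_append, List.sum_append, List.map_cons, List.sum_cons,
      Nat.succ_eq_add_one]
    have := pvW_children_lt al s n
    omega

def hamming_ball_alt (seq : String) (radius : Int) (alphabet : String) : List String :=
  hammingB alphabet [(seq, radius.toNat)]

-- ===== PRECONDITION & SPEC =====
-- Pre_ excludes large radii with nonempty seq and alphabet: there A's recursion depth
-- equals radius and CPython raises RecursionError (observed from radius ≈ 999); the
-- margin below the exact limit is because that limit depends on the caller's own depth.
def Pre_hamming_ball (seq : String) (radius : Int) (alphabet : String) : Prop :=
  radius ≤ 900 ∨ seq = "" ∨ alphabet = ""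
instance (seq : String) (radius : Int) (alphabet : String) : Decidable (Pre_hamming_ball seq radius alphabet) := by unfold Pre_hamming_ball; infer_instance
def pvWitness_hamming_ball : String × Int × String := ("AC", 1, "CGTAN")

def Spec_hamming_ball (seq : String) (radius : Int) (alphabet : String) (out : List String) : Prop := out = hamming_ball_alt seq radius alphabet
instance (seq : String) (radius : Int) (alphabet : String) (out : List String) : Decidable (Spec_hamming_ball seq radius alphabet out) := by unfold Spec_hamming_ball; infer_instance

-- ===== CLAIM (what is proved, stated in full; the proofs are below) =====
def Claim_equal_hamming_ball : Prop := ∀ (seq : String) (radius : Int) (alphabet : String), Dom_hamming_ball seq radius alphabet → Pre_hamming_ball seq radius alphabet → Spec_hamming_ball seq radius alphabet (hamming_ball seq radius alphabet)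

-- ===== LEMMAS AND PROOFS =====

-- A's nested extend-loops, written as one flatMap over B's child list
theorem hammingA_succ (al : String) (n : Nat) (s : String) :
    hammingA al (n + 1) s = s :: (childrenB al s).flatMap (fun c => hammingA al n c) := by
  simp only [hammingA, PySem.List.foldl_append_eq_flatMap, childrenB]
  simp only [List.flatMap_assoc, List.flatMap_map, List.singleton_append, List.cons.injEq,
    true_and]
  simp only [List.flatMap_def]
  congr 1
  apply List.map_congr_left
  intro i hi
  have hi' : i < s.toList.length := by
    simpa [String.length_toList] using List.mem_range.mp hi
  congr 1
  apply List.map_congr_left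
  intro l _
  have hset : s.toList.set i l = s.toList.take i ++ [l] ++ s.toList.drop (i + 1) := by
    rw [List.set_eq_take_append_cons_drop, if_pos hi']
    simp
  rw [hset]

-- the stack loop emits, node by node, exactly A's recursive ball of each stack entry
theorem hammingB_flatMap (al : String) (N : Nat) :
    ∀ stack : List (String × Nat), (stack.map (pvW al)).sum ≤ N →
      hammingB al stack = stack.flatMap (fun p => hammingA al p.2 p.1) := by
  induction N with
  | zero =>
    intro stack h
    match stack with
    | [] => simp [hammingB]
    | (s, r) :: rest =>
      exfalso
      have : 0 < pvW al (s, r) := Nat.pow_pos (by omega)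
      simp only [List.map_cons, List.sum_cons] at h
      omega
  | succ N ih =>
    intro stack h
    match stack with
    | [] => simp [hammingB]
    | (s, 0) :: rest =>
      have h1 : (rest.map (pvW al)).sum ≤ N := by
        have : 0 < pvW al (s, 0) := by simp [pvW]
        simp only [List.map_cons, List.sum_cons] at h
        omega
      simp [hammingB, ih rest h1, hammingA]
    | (s, n + 1) :: rest =>
      have hdec := pvW_children_lt al s n
      have h1 : ((((childrenB al s).map (fun c => (c, n))) ++ rest).map (pvW al)).sum ≤ N := by
        simp only [List.map_append, List.sum_append]
        simp only [List.map_cons, List.sum_cons] at h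
        omega
      simp only [hammingB, ih _ h1]
      simp [List.flatMap_append, List.flatMap_map, hammingA_succ]

-- ===== VERDICT (by name: the statement is the Claim_ definition above) =====
theorem hamming_ball_spec : Claim_equal_hamming_ball := by
  intro seq radius alphabet _ _
  unfold Spec_hamming_ball hamming_ball hamming_ball_alt
  rw [hammingB_flatMap alphabet (([(seq, radius.toNat)].map (pvW alphabet)).sum) _ (Nat.le_refl _)]
  simp
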